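-- pv_equiv track=rewrite | github.com/cahlen/idontknow | scripts/experiments/erdos-straus/test_erdos_straus.py | cpu_count_solutions
-- ===== SOURCE A (Python) =====
-- def cpu_count_solutions(p):
--     """CPU reference: count ordered triples (x,y,z) with x<=y<=z satisfying 4/p = 1/x+1/y+1/z."""
--     if p == 2:
--         # 4/2=2, need 1/x+1/y+1/z=2 with x<=y<=z. Only (1,2,2).
--         return 1
--
--     count = 0
--     x_min = p // 4 + 1
--     x_max = (3 * p) // 4
--
--     for x in range(x_min, x_max + 1):
--         num = 4 * x - p
--         den = p * x
--         if num <= 0: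
--             continue
--
--         y_min_r = (den + num - 1) // num  # ceil(den/num)
--         y_min = max(y_min_r, x)
--         y_max = (2 * den) // num
--
--         for y in range(y_min, y_max + 1):
--             z_num = den * y
--             z_den = num * y - den
--             if z_den <= 0:
--                 continue
--             if z_num % z_den != 0:
--                 continue
--             z = z_num // z_den
--             if z >= y:
--                 count += 1
--
--     return count
-- ===== SOURCE B (Python) =====
-- def cpu_count_solutions(p):
--     """Count ordered triples (x,y,z) with x<=y<=z satisfying 4/p = 1/x+1/y+1/z.
--
--     Per x it sets a = 4*x - p, b = p*x and rewrites 1/y+1/z = a/b as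
--     (a*y-b)*(a*z-b) = b*b, so the solutions correspond to the divisors d of
--     b*b with lo <= d <= b, d == -b (mod a) and b*b//d == -b (mod a).  Since
--     b*b = p*p*x*x, every such divisor is a product d1*d2 with d1 | p*p and
--     d2 | x*x, and those in turn are products of two divisors of p (resp. x),
--     found once by trial division up to the square root.  No y-loop is run.
--     """
--     if p == 2:
--         return 1
--
--     def divisors(n):
--         small, large = [], []
--         t = 1
--         while t * t <= n:
--             if n % t == 0:
--                 small.append(t)
--                 if t * t != n:
--                     large.append(n // t)
--             t += 1
--         return small + large
--
--     dp = divisors(p)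
--     dp2 = {e1 * e2 for e1 in dp for e2 in dp}  # the divisors of p*p
--
--     count = 0
--     for x in range(p // 4 + 1, (3 * p) // 4 + 1):
--         a = 4 * x - p
--         if a <= 0:
--             continue
--         b = p * x
--         b2 = b * b
--         dx = divisors(x)
--         dx2 = {f1 * f2 for f1 in dx for f2 in dx}  # the divisors of x*x
--         lo = a * max(b // a + 1, x) - b
--         sols = {d1 * d2
--                 for d1 in dp2 for d2 in dx2
--                 if lo <= d1 * d2 <= b
--                 and (d1 * d2 + b) % a == 0
--                 and (b2 // (d1 * d2) + b) % a == 0}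
--         count += len(sols)
--     return count
-- ===== Notes on version B (the rewrite author's own statement) =====
-- stated objective: faster
-- what changed: The inner loop over y (solve for z, remainder test, z>=y comparison) is gone: per x the solutions are exactly the divisors d of b^2=(p*x)^2 in [lo,b] with d == -b and b^2/d == -b (mod a=4x-p), and B enumerates those divisors as products of two divisors of p times two divisors of x (each found once by trial division up to the square root) and counts the qualifying products as a set.
import Mathlib
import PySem

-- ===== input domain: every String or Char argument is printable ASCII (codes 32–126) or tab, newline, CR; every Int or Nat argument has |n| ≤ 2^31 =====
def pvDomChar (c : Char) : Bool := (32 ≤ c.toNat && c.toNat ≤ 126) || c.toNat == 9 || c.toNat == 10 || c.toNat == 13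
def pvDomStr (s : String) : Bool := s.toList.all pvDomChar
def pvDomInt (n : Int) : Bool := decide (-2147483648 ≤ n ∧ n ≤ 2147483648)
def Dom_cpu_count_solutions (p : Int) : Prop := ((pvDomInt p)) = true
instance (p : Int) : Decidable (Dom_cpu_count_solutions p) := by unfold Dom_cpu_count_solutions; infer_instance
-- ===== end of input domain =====

-- B replaces the inner y-loop (solve for z, check the remainder, compare z ≥ y) by divisor
-- enumeration: the solutions for a given x are the divisors d of b² = (p·x)² in [lo, b] with
-- d ≡ -b and b²/d ≡ -b (mod a), and every such divisor is a product of two divisors of p and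
-- two divisors of x, found once by trial division up to the square root (objective: faster).

-- ===== PORT A =====
def cpu_count_solutions (p : Int) : Int :=
  if p = 2 then 1
  else
    let x_min := PySem.Int.floordiv p 4 + 1
    let x_max := PySem.Int.floordiv (3 * p) 4
    (PySem.List.pyRange x_min (x_max + 1) 1).foldl (fun count x =>
      let num := 4 * x - p
      let den := p * x
      if num ≤ 0 then count
      else
        let y_min_r := PySem.Int.floordiv (den + num - 1) num
        let y_min := max y_min_r x
        let y_max := PySem.Int.floordiv (2 * den) num
        (PySem.List.pyRange y_min (y_max + 1) 1).foldl (fun c y =>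
          let z_num := den * y
          let z_den := num * y - den
          if z_den ≤ 0 then c
          else if ¬ (PySem.Int.mod z_num z_den = 0) then c
          else
            let z := PySem.Int.floordiv z_num z_den
            if z ≥ y then c + 1 else c) count) 0

-- ===== PORT B =====
-- Source B's divisors(n): trial division, t walking 1,2,… while t*t ≤ n (the while loop is the
-- structural recursion on t); returns small ++ large exactly as the Python does.
def pydivAux (n t : Int) : List Int × List Int :=
  if _h : t * t ≤ n then
    let r := pydivAux n (t + 1)
    if PySem.Int.mod n t = 0 then
      (t :: r.1, if t * t = n then r.2 else PySem.Int.floordiv n t :: r.2)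
    else r
  else ([], [])
termination_by (n + 1 - t).toNat
decreasing_by
  have ht : t ≤ n := by
    by_cases h1 : 1 ≤ t
    · nlinarith
    · nlinarith [show t ≤ 0 by omega]
  omega

def pydivisors (n : Int) : List Int := (pydivAux n 1).1 ++ (pydivAux n 1).2

def cpu_count_solutions_alt (p : Int) : Int :=
  if p = 2 then 1
  else
    let dp := pydivisors p
    let dp2 := PySem.Set.ofList (dp.flatMap (fun e1 => dp.map (fun e2 => e1 * e2)))
    (PySem.List.pyRange (PySem.Int.floordiv p 4 + 1) (PySem.Int.floordiv (3 * p) 4 + 1) 1).foldl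
      (fun count x =>
        let a := 4 * x - p
        if a ≤ 0 then count
        else
          let b := p * x
          let b2 := b * b
          let dx := pydivisors x
          let dx2 := PySem.Set.ofList (dx.flatMap (fun f1 => dx.map (fun f2 => f1 * f2)))
          let lo := a * max (PySem.Int.floordiv b a + 1) x - b
          let sols := PySem.Set.ofList
            ((dp2.flatMap (fun d1 => dx2.map (fun d2 => d1 * d2))).filter
              (fun d => decide (lo ≤ d ∧ d ≤ b ∧ PySem.Int.mod (d + b) a = 0 ∧
                PySem.Int.mod (PySem.Int.floordiv b2 d + b) a = 0)))
          count + (sols.length : Int)) 0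

-- ===== PRECONDITION & SPEC =====
def Spec_cpu_count_solutions (p : Int) (out : Int) : Prop := out = cpu_count_solutions_alt p
instance (p : Int) (out : Int) : Decidable (Spec_cpu_count_solutions p out) := by unfold Spec_cpu_count_solutions; infer_instance

-- ===== CLAIM (what is proved, stated in full; the proofs are below) =====
def Claim_equal_cpu_count_solutions : Prop := ∀ (p : Int), Dom_cpu_count_solutions p → Spec_cpu_count_solutions p (cpu_count_solutions p)

-- ===== LEMMAS AND PROOFS =====

-- membership in the two lists produced by the trial-division loop
lemma pydivAux_mem (n : Int) (hn : 1 ≤ n) (t : Int) (ht : 1 ≤ t) (u : Int) :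
    (u ∈ (pydivAux n t).1 ↔ (t ≤ u ∧ u * u ≤ n ∧ u ∣ n)) ∧
    (u ∈ (pydivAux n t).2 ↔ (0 < u ∧ n < u * u ∧ u ∣ n ∧ t ≤ n / u)) := by
  rw [pydivAux]
  by_cases hsq : t * t ≤ n
  · have IH := pydivAux_mem n hn (t + 1) (by omega) u
    rw [dif_pos hsq]
    by_cases hdvd : PySem.Int.mod n t = 0
    · rw [if_pos hdvd]
      have htdvd : t ∣ n := (PySem.Int.mod_eq_zero_iff_dvd n t).1 hdvd
      constructor
      · simp only [List.mem_cons, IH.1]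
        constructor
        · rintro (rfl | ⟨h1, h2, h3⟩)
          · exact ⟨le_rfl, hsq, htdvd⟩
          · exact ⟨by omega, h2, h3⟩
        · rintro ⟨h1, h2, h3⟩
          rcases eq_or_lt_of_le h1 with heq | hlt
          · exact Or.inl heq.symm
          · exact Or.inr ⟨by omega, h2, h3⟩
      · have hediv : ∀ v : Int, 0 < v → v ∣ n → n / (n / v) = v := by
          intro v hv hvd
          have h1 : v * (n / v) = n := Int.mul_ediv_cancel' hvd
          have hk0 : n / v ≠ 0 := by
            intro h0
            rw [h0, mul_zero] at h1
            omega
          have h2 : n / (n / v) = (v * (n / v)) / (n / v) := by rw [h1]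
          rw [h2, Int.mul_ediv_cancel _ hk0]
        by_cases hne : t * t = n
        · rw [if_pos hne]
          rw [IH.2]
          constructor
          · rintro ⟨h1, h2, h3, h4⟩
            exact ⟨h1, h2, h3, by omega⟩
          · rintro ⟨h1, h2, h3, h4⟩
            refine ⟨h1, h2, h3, ?_⟩
            rcases eq_or_lt_of_le h4 with heq | hlt
            · exfalso
              have hnu : n / u * u = n := Int.ediv_mul_cancel h3
              rw [← heq] at hnu
              nlinarith
            · omega
        · rw [if_neg hne]
          have htn : t * t < n := lt_of_le_of_ne hsq hne
          have ht0 : (0 : Int) < t := by omega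
          have hft : PySem.Int.floordiv n t = n / t := PySem.Int.floordiv_eq_ediv_of_pos ht0
          have hnt : t * (n / t) = n := Int.mul_ediv_cancel' htdvd
          have hnt_pos : 0 < n / t := by nlinarith
          have htlt : t < n / t := by nlinarith
          simp only [List.mem_cons, IH.2, hft]
          constructor
          · rintro (rfl | ⟨h1, h2, h3, h4⟩)
            · refine ⟨hnt_pos, by nlinarith, ⟨t, by linarith [hnt]⟩, ?_⟩
              rw [hediv t ht0 htdvd]
            · exact ⟨h1, h2, h3, by omega⟩
          · rintro ⟨h1, h2, h3, h4⟩
            rcases eq_or_lt_of_le h4 with heq | hlt2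
            · left
              have hnu : n / u * u = n := Int.ediv_mul_cancel h3
              rw [← heq] at hnu
              rw [← hnu, Int.mul_ediv_cancel_left u (by omega)]
            · exact Or.inr ⟨h1, h2, h3, by omega⟩
    · rw [if_neg hdvd]
      have htnd : ¬ t ∣ n := fun h => hdvd ((PySem.Int.mod_eq_zero_iff_dvd n t).2 h)
      constructor
      · rw [IH.1]
        constructor
        · rintro ⟨h1, h2, h3⟩
          exact ⟨by omega, h2, h3⟩
        · rintro ⟨h1, h2, h3⟩
          refine ⟨?_, h2, h3⟩
          rcases eq_or_lt_of_le h1 with heq | hlt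
          · exact absurd (heq ▸ h3) htnd
          · omega
      · rw [IH.2]
        constructor
        · rintro ⟨h1, h2, h3, h4⟩
          exact ⟨h1, h2, h3, by omega⟩
        · rintro ⟨h1, h2, h3, h4⟩
          refine ⟨h1, h2, h3, ?_⟩
          rcases eq_or_lt_of_le h4 with heq | hlt2
          · exfalso
            have hnu : n / u * u = n := Int.ediv_mul_cancel h3
            rw [← heq] at hnu
            exact htnd ⟨u, hnu.symm⟩
          · omega
  · rw [dif_neg hsq]
    constructor
    · simp only [List.not_mem_nil, false_iff]
      rintro ⟨h1, h2, h3⟩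
      have : t * t ≤ u * u := by nlinarith
      omega
    · simp only [List.not_mem_nil, false_iff]
      rintro ⟨h1, h2, h3, h4⟩
      have hnu : n / u * u = n := Int.ediv_mul_cancel h3
      have hk : 0 < n / u := by omega
      have : t * t ≤ (n / u) * (n / u) := by nlinarith
      have : (n / u) * (n / u) < n := by nlinarith
      omega
termination_by (n + 1 - t).toNat
decreasing_by
  have ht2 : t ≤ n := by nlinarith
  omega

lemma pydivisors_mem (n : Int) (hn : 1 ≤ n) (u : Int) :
    u ∈ pydivisors n ↔ 0 < u ∧ u ∣ n := by
  have h := pydivAux_mem n hn 1 le_rfl u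
  unfold pydivisors
  rw [List.mem_append, h.1, h.2]
  constructor
  · rintro (⟨h1, h2, h3⟩ | ⟨h1, h2, h3, h4⟩)
    · exact ⟨by omega, h3⟩
    · exact ⟨h1, h3⟩
  · rintro ⟨hu, hdvd⟩
    by_cases hsq : u * u ≤ n
    · exact Or.inl ⟨by omega, hsq, hdvd⟩
    · refine Or.inr ⟨hu, by omega, hdvd, ?_⟩
      have hun : u ≤ n := Int.le_of_dvd (by omega) hdvd
      rw [Int.le_ediv_iff_mul_le hu]
      omega

-- a positive divisor of m*k splits into a positive divisor of m times one of k
lemma dvd_split_abs (m k u : Int) (hu : 0 < u) (h : u ∣ m * k) :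
    ∃ v w, 0 < v ∧ v ∣ m ∧ 0 < w ∧ w ∣ k ∧ u = v * w := by
  obtain ⟨v, w, hv, hw, huvw⟩ := exists_dvd_and_dvd_of_dvd_mul h
  have hv0 : v ≠ 0 := by
    rintro rfl
    rw [zero_mul] at huvw
    omega
  have hw0 : w ≠ 0 := by
    rintro rfl
    rw [mul_zero] at huvw
    omega
  refine ⟨|v|, |w|, abs_pos.2 hv0, (abs_dvd _ _).2 hv, abs_pos.2 hw0, (abs_dvd _ _).2 hw, ?_⟩
  rw [← abs_mul, ← huvw, abs_of_pos hu]

-- the set {e1*e2 : e1, e2 ∈ divisors(n)} is exactly the positive divisors of n²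
lemma sq_products_mem (n : Int) (hn : 1 ≤ n) (u : Int) :
    (u ∈ (pydivisors n).flatMap (fun e1 => (pydivisors n).map (fun e2 => e1 * e2))) ↔
      (0 < u ∧ u ∣ n * n) := by
  simp only [List.mem_flatMap, List.mem_map]
  constructor
  · rintro ⟨e1, he1, e2, he2, rfl⟩
    obtain ⟨h1, h2⟩ := (pydivisors_mem n hn e1).1 he1
    obtain ⟨h3, h4⟩ := (pydivisors_mem n hn e2).1 he2
    exact ⟨mul_pos h1 h3, mul_dvd_mul h2 h4⟩
  · rintro ⟨hu, hdvd⟩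
    obtain ⟨v, w, hv0, hvd, hw0, hwd, rfl⟩ := dvd_split_abs n n u hu hdvd
    exact ⟨v, (pydivisors_mem n hn v).2 ⟨hv0, hvd⟩, w, (pydivisors_mem n hn w).2 ⟨hw0, hwd⟩, rfl⟩

-- a range with positive step has no duplicates
lemma nodup_pyRange_pos (a b s : Int) (hs : 0 < s) : (PySem.List.pyRange a b s).Nodup := by
  rw [PySem.List.pyRange_of_pos _ _ hs]
  refine List.Nodup.map ?_ List.nodup_range
  intro k1 k2 h
  have h' : s * (k1 : Int) = s * (k2 : Int) := add_left_cancel h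
  have := mul_left_cancel₀ (ne_of_gt hs) h'
  exact_mod_cast this

-- dropping an initial segment on which the predicate is false does not change a countP over a range
lemma countP_pyRange_drop_low (P : Int → Bool) (lo lo' M : Int) (h : lo ≤ lo')
    (hF : ∀ y : Int, lo ≤ y → y < lo' → P y = false) :
    (PySem.List.pyRange lo M 1).countP P = (PySem.List.pyRange lo' M 1).countP P := by
  rcases le_or_gt lo' M with hM | hM
  · rw [PySem.List.pyRange_one_append lo lo' M h hM, List.countP_append]
    have h0 : (PySem.List.pyRange lo lo' 1).countP P = 0 := by
      rw [List.countP_eq_zero]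
      intro y hy
      have hb := (PySem.List.mem_pyRange_one).1 hy
      simp [hF y hb.1 hb.2]
    omega
  · rw [PySem.List.pyRange_one_eq_nil hM.le]
    rw [List.countP_nil, List.countP_eq_zero]
    intro y hy
    have hb := (PySem.List.mem_pyRange_one).1 hy
    simp [hF y hb.1 (lt_of_lt_of_le hb.2 hM.le)]

-- the algebraic core: with a*y = d + b and d > 0,  d ∣ b*y  ↔  d ∣ b² ∧ a ∣ b²/d + b
lemma core_dvd (a b d y : Int) (ha : 0 < a) (hd : 0 < d) (hay : a * y = d + b) :
    d ∣ b * y ↔ (d ∣ b * b ∧ a ∣ (b * b) / d + b) := by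
  constructor
  · rintro ⟨z, hz⟩
    have hbb : b * b = d * (a * z - b) := by linear_combination a * hz - b * hay
    refine ⟨⟨a * z - b, hbb⟩, ?_⟩
    rw [hbb, Int.mul_ediv_cancel_left _ (ne_of_gt hd)]
    exact ⟨z, by ring⟩
  · rintro ⟨⟨e, he⟩, hdvd⟩
    rw [he, Int.mul_ediv_cancel_left _ (ne_of_gt hd)] at hdvd
    obtain ⟨w, hw⟩ := hdvd
    refine ⟨w, mul_left_cancel₀ (ne_of_gt ha) ?_⟩
    linear_combination b * hay + d * hw + he

-- the progression of d-values is the affine image of the unit range of y-values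
lemma LB_eq_map (a b y1 : Int) (ha : 0 < a) :
    PySem.List.pyRange (a * y1 - b) (b + 1) a
      = (PySem.List.pyRange y1 (2 * b / a + 1) 1).map (fun y => a * y - b) := by
  have h2b := Int.mul_ediv_add_emod (2 * b) a
  have hr0 : 0 ≤ 2 * b % a := Int.emod_nonneg _ (ne_of_gt ha)
  have hra : 2 * b % a < a := Int.emod_lt_of_pos _ ha
  rw [PySem.List.pyRange_of_pos _ _ ha, PySem.List.pyRange_one, List.map_map]
  rcases le_or_gt y1 (2 * b / a) with h | h
  · have hmul : a * y1 ≤ a * (2 * b / a) := mul_le_mul_of_nonneg_left h ha.le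
    have hif : a * y1 - b < b + 1 := by linarith
    rw [if_pos hif]
    have e1 : b + 1 - (a * y1 - b) + a - 1 = 2 * b % a + a * (2 * b / a + 1 - y1) := by
      linear_combination -h2b
    have e2 : (b + 1 - (a * y1 - b) + a - 1) / a = 2 * b / a + 1 - y1 := by
      rw [e1, Int.add_mul_ediv_left _ _ (ne_of_gt ha),
        Int.ediv_eq_zero_of_lt hr0 hra, zero_add]
    rw [e2]
    apply List.map_congr_left
    intro k _
    simp only [Function.comp]
    ring
  · have hmul : a * (2 * b / a + 1) ≤ a * y1 := mul_le_mul_of_nonneg_left h ha.le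
    have hmul' : a * (2 * b / a + 1) = a * (2 * b / a) + a := by ring
    have hif : ¬ (a * y1 - b < b + 1) := by linarith
    rw [if_neg hif]
    have hz : (2 * b / a + 1 - y1).toNat = 0 := by omega
    rw [hz]
    simp

-- A's inner y-loop equals the count of qualifying d in the progression d ≡ -b (mod a), d ∈ [d0, b]
lemma inner_eq (a b x c : Int) (ha : 0 < a) (_hb : 0 < b) (hx : 0 < x) :
    (PySem.List.pyRange (max (PySem.Int.floordiv (b + a - 1) a) x) (PySem.Int.floordiv (2 * b) a + 1) 1).foldl
      (fun c y =>
        if a * y - b ≤ 0 then c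
        else if ¬ (PySem.Int.mod (b * y) (a * y - b) = 0) then c
        else if PySem.Int.floordiv (b * y) (a * y - b) ≥ y then c + 1 else c) c
    = c + (((PySem.List.pyRange (a * max (PySem.Int.floordiv b a + 1) x - b) (b + 1) a).countP
        (fun d => decide (PySem.Int.mod (b * b) d = 0 ∧
          PySem.Int.mod (PySem.Int.floordiv (b * b) d + b) a = 0))) : Int) := by
  have hqb := Int.mul_ediv_add_emod b a
  have hq0 : 0 ≤ b % a := Int.emod_nonneg _ (ne_of_gt ha)
  have hqa : b % a < a := Int.emod_lt_of_pos _ ha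
  have h2b := Int.mul_ediv_add_emod (2 * b) a
  have h2r0 : 0 ≤ 2 * b % a := Int.emod_nonneg _ (ne_of_gt ha)
  have h2ra : 2 * b % a < a := Int.emod_lt_of_pos _ ha
  rw [PySem.Int.floordiv_eq_ediv_of_pos ha, PySem.Int.floordiv_eq_ediv_of_pos ha,
    PySem.Int.floordiv_eq_ediv_of_pos ha]
  have hbodyA : (fun (c y : Int) =>
        if a * y - b ≤ 0 then c
        else if ¬ (PySem.Int.mod (b * y) (a * y - b) = 0) then c
        else if PySem.Int.floordiv (b * y) (a * y - b) ≥ y then c + 1 else c)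
      = (fun (c y : Int) =>
        if (¬ (a * y - b ≤ 0) ∧ PySem.Int.mod (b * y) (a * y - b) = 0 ∧
            y ≤ PySem.Int.floordiv (b * y) (a * y - b)) then c + 1 else c) := by
    funext c y
    split_ifs <;> simp_all [ge_iff_le]
  rw [hbodyA]
  rw [PySem.List.foldl_ite_add_one
    (fun y => ¬ (a * y - b ≤ 0) ∧ PySem.Int.mod (b * y) (a * y - b) = 0 ∧
      y ≤ PySem.Int.floordiv (b * y) (a * y - b))]
  congr 1
  congr 1
  -- drop the (at most one) initial y with a*y ≤ b, on which A's loop body does nothing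
  rw [countP_pyRange_drop_low _ (max ((b + a - 1) / a) x) (max (b / a + 1) x) _
    (max_le_max (by
      have : (b + a - 1) / a ≤ (b + 1 * a) / a :=
        Int.ediv_le_ediv ha (by linarith)
      rwa [Int.add_mul_ediv_right _ _ (ne_of_gt ha)] at this) (le_refl x))
    (by
      intro y hy1 hy2
      have hxy : x ≤ y := le_trans (le_max_right _ _) hy1
      have hyq : y ≤ b / a := by
        by_contra hcon
        exact absurd (max_le (by omega) hxy) (by omega)
      have : a * y ≤ a * (b / a) := mul_le_mul_of_nonneg_left hyq ha.le
      have hneg : a * y - b ≤ 0 := by linarith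
      simp [hneg])]
  rw [LB_eq_map a b _ ha, List.countP_map]
  apply List.countP_congr
  intro y hy
  have hyb := (PySem.List.mem_pyRange_one).1 hy
  have hy1 : max (b / a + 1) x ≤ y := hyb.1
  have hyq : b / a + 1 ≤ y := le_trans (le_max_left _ _) hy1
  have hyx : x ≤ y := le_trans (le_max_right _ _) hy1
  have hym : y ≤ 2 * b / a := by omega
  have haq : a * (b / a + 1) ≤ a * y := mul_le_mul_of_nonneg_left hyq ha.le
  have haq' : a * (b / a + 1) = a * (b / a) + a := by ring
  have hd : 0 < a * y - b := by linarith
  have ham : a * y ≤ a * (2 * b / a) := mul_le_mul_of_nonneg_left hym ha.le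
  have hdb : a * y - b ≤ b := by linarith
  have hy0 : 0 < y := lt_of_lt_of_le hx hyx
  simp only [Function.comp]
  have hfd : PySem.Int.floordiv (b * b) (a * y - b) = b * b / (a * y - b) :=
    PySem.Int.floordiv_eq_ediv_of_pos hd
  have hiff : (¬ (a * y - b ≤ 0) ∧ PySem.Int.mod (b * y) (a * y - b) = 0 ∧
        y ≤ PySem.Int.floordiv (b * y) (a * y - b))
      ↔ (PySem.Int.mod (b * b) (a * y - b) = 0 ∧
        PySem.Int.mod (PySem.Int.floordiv (b * b) (a * y - b) + b) a = 0) := by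
    rw [PySem.Int.mod_eq_zero_iff_dvd, PySem.Int.mod_eq_zero_iff_dvd, PySem.Int.mod_eq_zero_iff_dvd,
      hfd]
    constructor
    · rintro ⟨-, hdvd, -⟩
      exact (core_dvd a b (a * y - b) y ha hd (by ring)).1 hdvd
    · intro hR
      have hdvd := (core_dvd a b (a * y - b) y ha hd (by ring)).2 hR
      refine ⟨by omega, hdvd, ?_⟩
      rw [PySem.Int.le_floordiv_iff_mul_le hd]
      have h1 : y * (a * y - b) ≤ y * b := mul_le_mul_of_nonneg_left hdb hy0.le
      have h2 : y * b = b * y := mul_comm y b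
      linarith
  simp only [decide_eq_true_eq]
  exact hiff

-- the filtered progression is a permutation of B's solution set (same members, both duplicate-free)
lemma countP_eq_sols (p x a b : Int) (hp : 1 ≤ p) (hx : 1 ≤ x)
    (hA : a = 4 * x - p) (hB : b = p * x) (ha : 0 < a) :
    ((PySem.List.pyRange (a * max (PySem.Int.floordiv b a + 1) x - b) (b + 1) a).countP
        (fun d => decide (PySem.Int.mod (b * b) d = 0 ∧
          PySem.Int.mod (PySem.Int.floordiv (b * b) d + b) a = 0)))
    = (PySem.Set.ofList
        (((PySem.Set.ofList ((pydivisors p).flatMap (fun e1 => (pydivisors p).map (fun e2 => e1 * e2)))).flatMap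
            (fun d1 => (PySem.Set.ofList ((pydivisors x).flatMap (fun f1 => (pydivisors x).map (fun f2 => f1 * f2)))).map
              (fun d2 => d1 * d2))).filter
          (fun d => decide (a * max (PySem.Int.floordiv b a + 1) x - b ≤ d ∧ d ≤ b ∧
            PySem.Int.mod (d + b) a = 0 ∧
            PySem.Int.mod (PySem.Int.floordiv (b * b) d + b) a = 0)))).length := by
  have hb : 0 < b := by
    rw [hB]
    exact mul_pos (by omega) (by omega)
  have hfa : PySem.Int.floordiv b a = b / a := PySem.Int.floordiv_eq_ediv_of_pos ha
  simp only [hfa]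
  have hdiv := Int.mul_ediv_add_emod b a
  have hr0 : 0 ≤ b % a := Int.emod_nonneg _ (ne_of_gt ha)
  have hra : b % a < a := Int.emod_lt_of_pos _ ha
  have hM1 : b / a + 1 ≤ max (b / a + 1) x := le_max_left _ _
  have haM : a * (b / a + 1) ≤ a * max (b / a + 1) x := mul_le_mul_of_nonneg_left hM1 ha.le
  have haM' : a * (b / a + 1) = a * (b / a) + a := by ring
  have hd0 : 0 < a * max (b / a + 1) x - b := by omega
  have hmemP : ∀ v : Int, (v ∈ PySem.Set.ofList
      ((pydivisors p).flatMap (fun e1 => (pydivisors p).map (fun e2 => e1 * e2)))) ↔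
      (0 < v ∧ v ∣ p * p) :=
    fun v => (PySem.Set.mem_ofList _ v).trans (sq_products_mem p hp v)
  have hmemX : ∀ v : Int, (v ∈ PySem.Set.ofList
      ((pydivisors x).flatMap (fun f1 => (pydivisors x).map (fun f2 => f1 * f2)))) ↔
      (0 < v ∧ v ∣ x * x) :=
    fun v => (PySem.Set.mem_ofList _ v).trans (sq_products_mem x hx v)
  rw [List.countP_eq_length_filter]
  apply List.Perm.length_eq
  rw [List.perm_ext_iff_of_nodup (List.Nodup.filter _ (nodup_pyRange_pos _ _ _ ha))
    (PySem.Set.nodup_ofList _)]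
  intro u
  rw [PySem.Set.mem_ofList]
  simp only [List.mem_filter, PySem.List.mem_pyRange_iff_of_pos ha, List.mem_flatMap,
    List.mem_map, hmemP, hmemX, decide_eq_true_eq]
  constructor
  · rintro ⟨⟨hge, hlt, hcong⟩, hdvd', hC⟩
    have hu0 : 0 < u := by omega
    have hudvd : u ∣ b * b := (PySem.Int.mod_eq_zero_iff_dvd _ _).1 hdvd'
    have hudvd' : u ∣ (p * p) * (x * x) := by
      rw [hB] at hudvd
      rwa [show (p * x) * (p * x) = (p * p) * (x * x) by ring] at hudvd
    obtain ⟨d1, d2, h1, h2, h3, h4, rfl⟩ := dvd_split_abs (p * p) (x * x) _ hu0 hudvd'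
    refine ⟨⟨d1, ⟨h1, h2⟩, d2, ⟨h3, h4⟩, rfl⟩, hge, by omega, ?_, hC⟩
    rw [PySem.Int.mod_eq_zero_iff_dvd]
    have : d1 * d2 + b = (d1 * d2 - (a * max (b / a + 1) x - b)) + a * max (b / a + 1) x := by
      ring
    rw [this]
    exact dvd_add hcong ⟨max (b / a + 1) x, rfl⟩
  · rintro ⟨⟨d1, ⟨h1, h2⟩, d2, ⟨h3, h4⟩, rfl⟩, hge, hle, hcong, hC⟩
    have hudvd : d1 * d2 ∣ b * b := by
      rw [hB, show (p * x) * (p * x) = (p * p) * (x * x) by ring]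
      exact mul_dvd_mul h2 h4
    refine ⟨⟨hge, by omega, ?_⟩, (PySem.Int.mod_eq_zero_iff_dvd _ _).2 hudvd, hC⟩
    rw [PySem.Int.mod_eq_zero_iff_dvd] at hcong
    have : d1 * d2 - (a * max (b / a + 1) x - b) =
        (d1 * d2 + b) - a * max (b / a + 1) x := by ring
    rw [this]
    exact dvd_sub hcong ⟨max (b / a + 1) x, rfl⟩

-- ===== VERDICT (by name: the statement is the Claim_ definition above) =====
theorem cpu_count_solutions_spec : Claim_equal_cpu_count_solutions := by
  intro p _
  unfold Spec_cpu_count_solutions cpu_count_solutions cpu_count_solutions_alt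
  by_cases hp2 : p = 2
  · simp [hp2]
  · rw [if_neg hp2, if_neg hp2]
    dsimp only
    rcases le_or_gt p 1 with hp | hp
    · -- the x-range is empty for p ≤ 1
      have hnil : PySem.Int.floordiv (3 * p) 4 + 1 ≤ PySem.Int.floordiv p 4 + 1 := by
        rw [PySem.Int.floordiv_eq_ediv_of_pos (by norm_num : (0:Int) < 4),
          PySem.Int.floordiv_eq_ediv_of_pos (by norm_num : (0:Int) < 4)]
        rcases le_or_gt p 0 with hp0 | hp0
        · have := Int.ediv_le_ediv (by norm_num : (0:Int) < 4) (by linarith : 3 * p ≤ p)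
          omega
        · have hp1 : p = 1 := by omega
          subst hp1
          decide
      rw [PySem.List.pyRange_one_eq_nil hnil]
      rfl
    · have hp0 : 0 ≤ p := by omega
      apply PySem.List.foldl_congr_mem
      intro acc x hx
      have hxb := (PySem.List.mem_pyRange_one).1 hx
      have hx1 : 1 ≤ x := by
        have h4 : 0 ≤ PySem.Int.floordiv p 4 := by
          rw [PySem.Int.floordiv_eq_ediv_of_pos (by norm_num : (0:Int) < 4)]
          exact Int.ediv_nonneg hp0 (by norm_num)
        omega
      by_cases hnum : 4 * x - p ≤ 0
      · rw [if_pos hnum, if_pos hnum]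
      · rw [if_neg hnum, if_neg hnum]
        rw [inner_eq (4 * x - p) (p * x) x acc (by omega)
          (mul_pos (by omega) (by omega)) (by omega)]
        rw [countP_eq_sols p x (4 * x - p) (p * x) (by omega) hx1 rfl rfl (by omega)]
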